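-- pv_equiv track=rewrite | github.com/tbates097/parts-perf-report | scripts/build_summary_ui.py | fully_matched
-- ===== SOURCE A (Python) =====
-- from typing import Dict, List, Optional
--
-- REQUIRED_METRICS = [
--     "Average_Repeatability",
--     "Avg_Uncalibrated_Accuracy",
--     "Avg_Calibrated_Accuracy",
-- ]
--
-- EXCLUDE_NOTE_PREFIXES = (
--     "No specific PN in specs",
--     "no base model found in specs",
--     "No matching spec key",
-- )
--
-- def is_note_excluded(note: str) -> bool:
--     if not note:
--         return False
--     note = note.strip()
--     return any(note.startswith(pref) for pref in EXCLUDE_NOTE_PREFIXES)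
--
-- def fully_matched(part_rows: List[Dict[str, str]]) -> bool:
--     # Must have all required metrics with concrete spec_max and pass True/False and no exclusion notes
--     metrics_present = {m: False for m in REQUIRED_METRICS}
--     for r in part_rows:
--         m = r.get("metric", "")
--         if m not in metrics_present:
--             continue
--         if is_note_excluded(r.get("note", "")):
--             return False
--         if not (r.get("spec_max") or "").strip():
--             continue
--         p = (r.get("pass") or "").strip()
--         if p not in ("True", "False"):
--             continue
--         metrics_present[m] = True
--     return all(metrics_present.values())
-- ===== SOURCE B (Python) =====
-- from typing import Dict, List
--
-- REQUIRED_METRICS = [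
--     "Average_Repeatability",
--     "Avg_Uncalibrated_Accuracy",
--     "Avg_Calibrated_Accuracy",
-- ]
--
-- EXCLUDE_NOTE_PREFIXES = (
--     "No specific PN in specs",
--     "no base model found in specs",
--     "No matching spec key",
-- )
--
-- def is_note_excluded(note: str) -> bool:
--     if not note:
--         return False
--     note = note.strip()
--     return any(note.startswith(pref) for pref in EXCLUDE_NOTE_PREFIXES)
--
-- def fully_matched(part_rows: List[Dict[str, str]]) -> bool:
--     # Two declarative passes instead of one mutating-dict loop.
--     rel = [r for r in part_rows if r.get("metric", "") in REQUIRED_METRICS]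
--     if any(is_note_excluded(r.get("note", "")) for r in rel):
--         return False
--
--     def ok(r):
--         return ((r.get("spec_max") or "").strip() != ""
--                 and (r.get("pass") or "").strip() in ("True", "False"))
--
--     return all(
--         any(ok(r) for r in rel if r.get("metric", "") == m)
--         for m in REQUIRED_METRICS
--     )
-- ===== Notes on version B (the rewrite author's own statement) =====
-- stated objective: simpler
-- what changed: Replaced the single loop that mutates a metrics_present dict (with an early return inside it) by two declarative passes: a filter to the required-metric rows plus a global any() for the note exclusion, then an all/any comprehension per required metric.
import Mathlib
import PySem

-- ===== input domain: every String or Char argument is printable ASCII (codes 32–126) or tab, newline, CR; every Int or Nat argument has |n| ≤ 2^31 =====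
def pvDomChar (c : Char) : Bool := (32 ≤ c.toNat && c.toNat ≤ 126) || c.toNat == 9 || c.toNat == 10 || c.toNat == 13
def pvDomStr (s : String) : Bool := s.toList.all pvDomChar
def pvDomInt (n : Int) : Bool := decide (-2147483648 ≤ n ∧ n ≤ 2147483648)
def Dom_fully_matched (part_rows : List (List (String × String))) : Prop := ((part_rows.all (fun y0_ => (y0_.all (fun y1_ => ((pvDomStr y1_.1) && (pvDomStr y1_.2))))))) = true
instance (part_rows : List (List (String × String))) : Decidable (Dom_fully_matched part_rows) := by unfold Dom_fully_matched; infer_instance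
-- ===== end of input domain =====

-- B replaces A's single mutating-dict loop by a filter pass plus all/any comprehensions (same O(n) cost, plainer decomposition).


-- ===== PORT A =====
-- r.get(k, "") on a dict-row (assoc list, first match wins)
def pvRget (r : List (String × String)) (k : String) : String :=
  ((r.find? (fun p => p.1 == k)).map Prod.snd).getD ""

def REQUIRED_METRICS : List String :=
  ["Average_Repeatability", "Avg_Uncalibrated_Accuracy", "Avg_Calibrated_Accuracy"]

def EXCLUDE_NOTE_PREFIXES : List String :=
  ["No specific PN in specs", "no base model found in specs", "No matching spec key"]

def is_note_excluded (note : String) : Bool :=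
  if note = "" then false
  else
    let note := PySem.Str.strip note
    EXCLUDE_NOTE_PREFIXES.any (fun pref => PySem.Str.startswith note pref)

-- the 'for r in part_rows' loop of A, with its early 'return False'
def fullyMatchedLoop (rows : List (List (String × String)))
    (metrics_present : PySem.Dict String Bool) : Bool :=
  match rows with
  | [] => metrics_present.values.all (fun b => b)
  | r :: rest =>
    let m := pvRget r "metric"
    if !(metrics_present.contains m) then fullyMatchedLoop rest metrics_present
    else if is_note_excluded (pvRget r "note") then false
    else if PySem.Str.strip (pvRget r "spec_max") = "" then fullyMatchedLoop rest metrics_present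
    else
      let p := PySem.Str.strip (pvRget r "pass")
      if !(p == "True" || p == "False") then fullyMatchedLoop rest metrics_present
      else fullyMatchedLoop rest (metrics_present.insert m true)

def fully_matched (part_rows : List (List (String × String))) : Bool :=
  let metrics_present : PySem.Dict String Bool :=
    REQUIRED_METRICS.foldl (fun d m => d.insert m false) PySem.Dict.empty
  fullyMatchedLoop part_rows metrics_present

-- ===== PORT B =====
def pvOkRow (r : List (String × String)) : Bool :=
  (PySem.Str.strip (pvRget r "spec_max") != "") &&
  (let p := PySem.Str.strip (pvRget r "pass"); p == "True" || p == "False")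

def fully_matched_alt (part_rows : List (List (String × String))) : Bool :=
  let rel := part_rows.filter (fun r => REQUIRED_METRICS.contains (pvRget r "metric"))
  if rel.any (fun r => is_note_excluded (pvRget r "note")) then false
  else REQUIRED_METRICS.all
    (fun m => (rel.filter (fun r => pvRget r "metric" == m)).any pvOkRow)

-- ===== PRECONDITION & SPEC =====
def Spec_fully_matched (part_rows : List (List (String × String))) (out : Bool) : Prop := out = fully_matched_alt part_rows
instance (part_rows : List (List (String × String))) (out : Bool) : Decidable (Spec_fully_matched part_rows out) := by unfold Spec_fully_matched; infer_instance

-- ===== CLAIM (what is proved, stated in full; the proofs are below) =====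
def Claim_equal_fully_matched : Prop := ∀ (part_rows : List (List (String × String))), Dom_fully_matched part_rows → Spec_fully_matched part_rows (fully_matched part_rows)

-- ===== LEMMAS AND PROOFS =====

-- proof-only abbreviations: the note-exclusion test and the per-metric success test of B
def pvExc (r : List (String × String)) : Bool :=
  REQUIRED_METRICS.contains (pvRget r "metric") && is_note_excluded (pvRget r "note")

def pvSeen (m : String) (rows : List (List (String × String))) : Bool :=
  rows.any (fun r => pvRget r "metric" == m && pvOkRow r)

lemma pvContains_mk (b1 b2 b3 : Bool) (m : String) :
    (PySem.Dict.mk [("Average_Repeatability",b1),("Avg_Uncalibrated_Accuracy",b2),("Avg_Calibrated_Accuracy",b3)]).contains m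
      = REQUIRED_METRICS.contains m := by
  by_cases h1 : m = "Average_Repeatability" <;> by_cases h2 : m = "Avg_Uncalibrated_Accuracy" <;>
    by_cases h3 : m = "Avg_Calibrated_Accuracy" <;>
    (simp [PySem.Dict.contains, REQUIRED_METRICS, h1, h2, h3];
     try exact ⟨fun h => h1 h.symm, fun h => h2 h.symm, fun h => h3 h.symm⟩)

lemma pvIns1 (b1 b2 b3 : Bool) :
    (PySem.Dict.mk [("Average_Repeatability",b1),("Avg_Uncalibrated_Accuracy",b2),("Avg_Calibrated_Accuracy",b3)]).insert "Average_Repeatability" true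
    = PySem.Dict.mk [("Average_Repeatability",true),("Avg_Uncalibrated_Accuracy",b2),("Avg_Calibrated_Accuracy",b3)] := by
  simp [PySem.Dict.insert, PySem.Dict.contains]

lemma pvIns2 (b1 b2 b3 : Bool) :
    (PySem.Dict.mk [("Average_Repeatability",b1),("Avg_Uncalibrated_Accuracy",b2),("Avg_Calibrated_Accuracy",b3)]).insert "Avg_Uncalibrated_Accuracy" true
    = PySem.Dict.mk [("Average_Repeatability",b1),("Avg_Uncalibrated_Accuracy",true),("Avg_Calibrated_Accuracy",b3)] := by
  simp [PySem.Dict.insert, PySem.Dict.contains]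

lemma pvIns3 (b1 b2 b3 : Bool) :
    (PySem.Dict.mk [("Average_Repeatability",b1),("Avg_Uncalibrated_Accuracy",b2),("Avg_Calibrated_Accuracy",b3)]).insert "Avg_Calibrated_Accuracy" true
    = PySem.Dict.mk [("Average_Repeatability",b1),("Avg_Uncalibrated_Accuracy",b2),("Avg_Calibrated_Accuracy",true)] := by
  simp [PySem.Dict.insert, PySem.Dict.contains]

def pvD (b1 b2 b3 : Bool) : PySem.Dict String Bool :=
  PySem.Dict.mk [("Average_Repeatability",b1),("Avg_Uncalibrated_Accuracy",b2),("Avg_Calibrated_Accuracy",b3)]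

lemma fullyMatchedLoop_eq (rows : List (List (String × String))) (b1 b2 b3 : Bool) :
    fullyMatchedLoop rows (pvD b1 b2 b3) =
      if rows.any pvExc then false
      else (b1 || pvSeen "Average_Repeatability" rows) &&
           ((b2 || pvSeen "Avg_Uncalibrated_Accuracy" rows) &&
            (b3 || pvSeen "Avg_Calibrated_Accuracy" rows)) := by
  induction rows generalizing b1 b2 b3 with
  | nil => simp [fullyMatchedLoop, pvSeen, pvD, PySem.Dict.values]
  | cons r rest ih =>
    by_cases hrel : REQUIRED_METRICS.contains (pvRget r "metric") = true
    · have hm3 : pvRget r "metric" = "Average_Repeatability" ∨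
          pvRget r "metric" = "Avg_Uncalibrated_Accuracy" ∨
          pvRget r "metric" = "Avg_Calibrated_Accuracy" := by
        simpa [REQUIRED_METRICS] using hrel
      by_cases he : is_note_excluded (pvRget r "note") = true
      · have hex : pvExc r = true := by
          simp only [pvExc, hrel, he, Bool.and_self]
        rcases hm3 with h | h | h <;>
          simp [fullyMatchedLoop, pvD, h, he, List.any_cons, hex]
      · have hex : pvExc r = false := by
          simp only [pvExc]
          rw [(by simpa using he : is_note_excluded (pvRget r "note") = false), Bool.and_false]
        by_cases hok : pvOkRow r = true
        · have hok' := hok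
          simp only [pvOkRow, Bool.and_eq_true, Bool.or_eq_true, beq_iff_eq,
            bne_iff_ne, ne_eq] at hok'
          have hsm : ¬PySem.Str.strip (pvRget r "spec_max") = "" := hok'.1
          have hpTF : PySem.Str.strip (pvRget r "pass") = "True" ∨
              PySem.Str.strip (pvRget r "pass") = "False" := hok'.2
          have hct : (pvD b1 b2 b3).contains (pvRget r "metric") = true := by
            rw [pvD, pvContains_mk]; exact hrel
          rcases hm3 with h | h | h
          · have hctl : (pvD b1 b2 b3).contains "Average_Repeatability" = true := h ▸ hct
            have hins : (pvD b1 b2 b3).insert "Average_Repeatability" true = pvD true b2 b3 := by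
              rw [pvD, pvD]; exact pvIns1 b1 b2 b3
            have hs1 : pvSeen "Average_Repeatability" (r :: rest) = true := by
              simp [pvSeen, List.any_cons, h, hok]
            have hs2 : pvSeen "Avg_Uncalibrated_Accuracy" (r :: rest) =
                pvSeen "Avg_Uncalibrated_Accuracy" rest := by
              simp [pvSeen, List.any_cons, h]
            have hs3 : pvSeen "Avg_Calibrated_Accuracy" (r :: rest) =
                pvSeen "Avg_Calibrated_Accuracy" rest := by
              simp [pvSeen, List.any_cons, h]
            rcases hpTF with hp | hp <;>
              simp [fullyMatchedLoop, h, he, hsm, hp, List.any_cons, hex, hs1, hs2, hs3,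
                hctl, hins, ih]
          · have hctl : (pvD b1 b2 b3).contains "Avg_Uncalibrated_Accuracy" = true := h ▸ hct
            have hins : (pvD b1 b2 b3).insert "Avg_Uncalibrated_Accuracy" true = pvD b1 true b3 := by
              rw [pvD, pvD]; exact pvIns2 b1 b2 b3
            have hs1 : pvSeen "Average_Repeatability" (r :: rest) =
                pvSeen "Average_Repeatability" rest := by
              simp [pvSeen, List.any_cons, h]
            have hs2 : pvSeen "Avg_Uncalibrated_Accuracy" (r :: rest) = true := by
              simp [pvSeen, List.any_cons, h, hok]
            have hs3 : pvSeen "Avg_Calibrated_Accuracy" (r :: rest) =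
                pvSeen "Avg_Calibrated_Accuracy" rest := by
              simp [pvSeen, List.any_cons, h]
            rcases hpTF with hp | hp <;>
              simp [fullyMatchedLoop, h, he, hsm, hp, List.any_cons, hex, hs1, hs2, hs3,
                hctl, hins, ih]
          · have hs1 : pvSeen "Average_Repeatability" (r :: rest) =
                pvSeen "Average_Repeatability" rest := by
              simp [pvSeen, List.any_cons, h]
            have hs2 : pvSeen "Avg_Uncalibrated_Accuracy" (r :: rest) =
                pvSeen "Avg_Uncalibrated_Accuracy" rest := by
              simp [pvSeen, List.any_cons, h]
            have hs3 : pvSeen "Avg_Calibrated_Accuracy" (r :: rest) = true := by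
              simp [pvSeen, List.any_cons, h, hok]
            have hctl : (pvD b1 b2 b3).contains "Avg_Calibrated_Accuracy" = true := h ▸ hct
            have hins : (pvD b1 b2 b3).insert "Avg_Calibrated_Accuracy" true = pvD b1 b2 true := by
              rw [pvD, pvD]; exact pvIns3 b1 b2 b3
            rcases hpTF with hp | hp <;>
              simp [fullyMatchedLoop, h, he, hsm, hp, List.any_cons, hex, hs1, hs2, hs3,
                hctl, hins, ih]
        · have hs : ∀ m, pvSeen m (r :: rest) = pvSeen m rest := by
            intro m; simp [pvSeen, List.any_cons, hok]
          have hskip : fullyMatchedLoop (r :: rest) (pvD b1 b2 b3) =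
              fullyMatchedLoop rest (pvD b1 b2 b3) := by
            by_cases hsm : PySem.Str.strip (pvRget r "spec_max") = ""
            · rcases hm3 with h | h | h <;> simp [fullyMatchedLoop, pvD, h, he, hsm]
            · have hok' : ¬(PySem.Str.strip (pvRget r "spec_max") ≠ "" ∧
                  (PySem.Str.strip (pvRget r "pass") = "True" ∨
                   PySem.Str.strip (pvRget r "pass") = "False")) := by
                simpa only [pvOkRow, Bool.and_eq_true, Bool.or_eq_true, beq_iff_eq,
                  bne_iff_ne, ne_eq] using hok
              have hpa : (PySem.Str.strip (pvRget r "pass") == "True") = false :=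
                beq_eq_false_iff_ne.mpr (fun hh => hok' ⟨hsm, Or.inl hh⟩)
              have hpb : (PySem.Str.strip (pvRget r "pass") == "False") = false :=
                beq_eq_false_iff_ne.mpr (fun hh => hok' ⟨hsm, Or.inr hh⟩)
              rcases hm3 with h | h | h <;> simp [fullyMatchedLoop, pvD, h, he, hsm, hpa, hpb]
          rw [hskip, ih]
          simp [List.any_cons, hex, hs]
    · have hc0 : REQUIRED_METRICS.contains (pvRget r "metric") = false := by
        simpa using hrel
      have hex : pvExc r = false := by
        simp only [pvExc, hc0, Bool.false_and]
      have hseen : ∀ m, m ∈ REQUIRED_METRICS → (pvRget r "metric" == m) = false := by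
        intro m hm
        have hnm : pvRget r "metric" ∉ REQUIRED_METRICS := by simpa using hrel
        exact beq_eq_false_iff_ne.mpr (fun h => hnm (h ▸ hm))
      have hc : (pvD b1 b2 b3).contains (pvRget r "metric") = false := by
        rw [pvD, pvContains_mk, hc0]
      have hstep : fullyMatchedLoop (r :: rest) (pvD b1 b2 b3) =
          fullyMatchedLoop rest (pvD b1 b2 b3) := by
        simp only [fullyMatchedLoop, hc, Bool.not_false, if_true]
      rw [hstep, ih]
      simp [pvSeen, List.any_cons, hex,
        hseen "Average_Repeatability" (by simp [REQUIRED_METRICS]),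
        hseen "Avg_Uncalibrated_Accuracy" (by simp [REQUIRED_METRICS]),
        hseen "Avg_Calibrated_Accuracy" (by simp [REQUIRED_METRICS])]

lemma alt_eq (part_rows : List (List (String × String))) :
    fully_matched_alt part_rows =
      if part_rows.any pvExc then false
      else (false || pvSeen "Average_Repeatability" part_rows) &&
           ((false || pvSeen "Avg_Uncalibrated_Accuracy" part_rows) &&
            (false || pvSeen "Avg_Calibrated_Accuracy" part_rows)) := by
  have hany : ∀ m, m ∈ REQUIRED_METRICS →
      (part_rows.any fun a =>
        pvRget a "metric" == m &&
        (["Average_Repeatability","Avg_Uncalibrated_Accuracy","Avg_Calibrated_Accuracy"] : List String).contains (pvRget a "metric") && pvOkRow a)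
      = pvSeen m part_rows := by
    intro m hm
    rw [pvSeen]
    congr 1
    funext a
    by_cases h : pvRget a "metric" = m
    · have hct : (["Average_Repeatability","Avg_Uncalibrated_Accuracy","Avg_Calibrated_Accuracy"] : List String).contains (pvRget a "metric") = true := by
        rw [h]
        simpa [REQUIRED_METRICS] using hm
      have heq : (pvRget a "metric" == m) = true := beq_iff_eq.mpr h
      rw [heq, hct]
      simp
    · have heq : (pvRget a "metric" == m) = false := beq_eq_false_iff_ne.mpr h
      rw [heq]
      simp
  rw [fully_matched_alt]
  simp only [List.any_filter, List.filter_filter, REQUIRED_METRICS, List.all_cons,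
    List.all_nil, Bool.and_true]
  rw [hany "Average_Repeatability" (by simp [REQUIRED_METRICS]),
      hany "Avg_Uncalibrated_Accuracy" (by simp [REQUIRED_METRICS]),
      hany "Avg_Calibrated_Accuracy" (by simp [REQUIRED_METRICS])]
  have hexc : (part_rows.any fun a =>
      (["Average_Repeatability","Avg_Uncalibrated_Accuracy","Avg_Calibrated_Accuracy"] : List String).contains (pvRget a "metric") &&
      is_note_excluded (pvRget a "note")) = part_rows.any pvExc := rfl
  rw [hexc]
  by_cases hx : part_rows.any pvExc = true <;> simp [hx]

-- ===== VERDICT (by name: the statement is the Claim_ definition above) =====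
theorem fully_matched_spec : Claim_equal_fully_matched := by
  intro part_rows _
  unfold Spec_fully_matched fully_matched
  have hinit : (REQUIRED_METRICS.foldl (fun (d : PySem.Dict String Bool) m => d.insert m false) PySem.Dict.empty)
      = pvD false false false := rfl
  rw [hinit, fullyMatchedLoop_eq, alt_eq]
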